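-- pv_equiv track=rewrite | github.com/d14405011-sudo/2026-python | weeks/week-03/solutions/1114405011/100/q100.py | solve
-- ===== SOURCE A (Python) =====
-- _cache: dict[int, int] = {1: 1}
--
-- def cycle_length(n: int) -> int:
--     """
--     計算單一正整數 n 的 Collatz cycle-length。
--
--     演算法：
--       - 若 n 已在快取中，直接回傳快取值（記憶化剪枝）
--       - 否則依奇偶性遞迴計算下一個 n 的 cycle-length，再加 1
--       - 計算結果存回快取，供後續查詢使用
--
--     參數：
--         n (int): 正整數，0 < n < 1,000,000
--
--     回傳：
--         int: n 的 cycle-length（數列長度，包含起始值 n 與結尾 1）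
--     """
--     # 快取命中：直接使用已知結果，不再遞迴
--     if n in _cache:
--         return _cache[n]
--
--     # 依奇偶性套用 Collatz 規則，遞迴求出下一步的 cycle-length 後加 1
--     if n % 2 == 1:
--         # 奇數情況：下一個數為 3n + 1
--         result = 1 + cycle_length(3 * n + 1)
--     else:
--         # 偶數情況：下一個數為 n / 2（整數除法）
--         result = 1 + cycle_length(n // 2)
--
--     # 將計算結果存入快取，下次查詢 O(1) 直接取得
--     _cache[n] = result
--     return result
--
-- def max_cycle_in_range(i: int, j: int) -> int:
--     """
--     計算閉區間 [min(i,j), max(i,j)] 內所有整數的最大 cycle-length。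
--
--     由於題目允許 i > j 的輸入，此函式會先自動調整區間順序，
--     確保 lo <= hi，再對區間內每個整數呼叫 cycle_length() 取最大值。
--
--     參數：
--         i (int): 區間端點之一（正整數）
--         j (int): 區間端點之一（正整數）
--
--     回傳：
--         int: 區間內最大 cycle-length
--     """
--     # 自動校正：無論輸入順序為何，lo 永遠 <= hi
--     lo, hi = min(i, j), max(i, j)
--
--     # 對區間內每個整數計算 cycle-length，利用 max() 取最大值
--     # 搭配快取後，已計算過的 n 不會重複遞迴
--     return max(cycle_length(n) for n in range(lo, hi + 1))
--
-- def solve(input_text: str) -> str: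
--     """
--     解析多行輸入字串，回傳對應的多行輸出字串。
--
--     輸入格式（每行）：i j
--     輸出格式（每行）：i j max_cycle_length
--
--     處理流程：
--       1. 逐行讀取輸入
--       2. 跳過空白行（容錯處理）
--       3. 解析 i, j 後呼叫 max_cycle_in_range()
--       4. 依「原始 i j max」格式組合輸出行
--
--     參數：
--         input_text (str): 包含多組測試資料的字串
--
--     回傳：
--         str: 多行輸出字串（各行以換行符分隔，結尾無多餘換行）
--     """
--     output_lines = []  # 收集每行輸出結果
--
--     for line in input_text.strip().splitlines():
--         line = line.strip()
--
--         # 跳過空白行，避免解析錯誤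
--         if not line:
--             continue
--
--         # 將一行中的兩個整數解析為 i, j
--         i, j = map(int, line.split())
--
--         # 計算 [min(i,j), max(i,j)] 區間內最大 cycle-length
--         max_cl = max_cycle_in_range(i, j)
--
--         # 輸出保留原始 i, j 順序（題目規定），後接最大 cycle-length
--         output_lines.append(f"{i} {j} {max_cl}")
--
--     # 用換行符串接所有輸出行，結尾不加額外換行
--     return "\n".join(output_lines)
-- ===== SOURCE B (Python) =====
-- _cache: dict[int, int] = {1: 1}
--
-- def cycle_length(n: int) -> int:
--     # Iterative: walk the Collatz chain pushing unseen values on a stack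
--     # until a cached value is hit, then pop the stack back off, giving each
--     # popped value a cache entry one greater than its successor's.
--     stack = []
--     m = n
--     while m not in _cache:
--         stack.append(m)
--         m = 3 * m + 1 if m % 2 == 1 else m // 2
--     length = _cache[m]
--     while stack:
--         length += 1
--         _cache[stack.pop()] = length
--     return length
--
-- def max_cycle_in_range(i: int, j: int) -> int:
--     lo, hi = (i, j) if i <= j else (j, i)
--     best = cycle_length(lo)
--     for n in range(lo + 1, hi + 1):
--         length = cycle_length(n)
--         if length > best:
--             best = length
--     return best
--
-- def solve(input_text: str) -> str:
--     results = []
--     for raw in input_text.strip().splitlines():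
--         parts = raw.split()
--         if not parts:
--             continue
--         i, j = int(parts[0]), int(parts[1])
--         results.append(f"{i} {j} {max_cycle_in_range(i, j)}")
--     return "\n".join(results)
-- ===== Notes on version B (the rewrite author's own statement) =====
-- stated objective: alternative
-- what changed: cycle_length's memoized recursion is replaced by an explicit-stack iteration (walk the Collatz chain until a cache hit, then pop the stack backfilling cache entries one greater than their successor's), max(generator) by a running-max loop, and tuple unpacking by direct indexing; same cache contents and outputs.
import Mathlib
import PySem

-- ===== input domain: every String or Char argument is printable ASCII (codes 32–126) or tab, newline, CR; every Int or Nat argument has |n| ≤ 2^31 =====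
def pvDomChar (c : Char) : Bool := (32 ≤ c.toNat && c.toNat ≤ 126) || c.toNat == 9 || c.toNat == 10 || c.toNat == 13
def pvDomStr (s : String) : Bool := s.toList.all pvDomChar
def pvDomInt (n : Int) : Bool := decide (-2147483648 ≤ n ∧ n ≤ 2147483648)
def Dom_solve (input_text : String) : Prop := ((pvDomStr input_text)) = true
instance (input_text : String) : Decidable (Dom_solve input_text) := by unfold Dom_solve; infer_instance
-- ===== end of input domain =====

-- B replaces A's memoized recursion by an explicit-stack iteration over the same cache
-- (walk down until a cache hit, then backfill popped values) and a running-max loop;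
-- objective: alternative (same cost, recursion-free).

-- Fuel bounds the walk down a Collatz chain in both ports (totality guard only; Python has none).
def pvFuel : Nat := 100000

def pvInitCache : PySem.Dict Int Int := PySem.Dict.ofList [(1, 1)]

-- ===== PORT A =====
-- cycle_length: memoized recursion, cache threaded in place of the Python global _cache.
def cycleA (fuel : Nat) (c : PySem.Dict Int Int) (n : Int) : Option (Int × PySem.Dict Int Int) :=
  match PySem.Dict.get? c n with
  | some v => some (v, c)
  | none =>
    match fuel with
    | 0 => none
    | f + 1 =>
      match (if PySem.Int.mod n 2 = 1 then cycleA f c (3 * n + 1)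
             else cycleA f c (PySem.Int.floordiv n 2)) with
      | none => none
      | some (r, c') => some (1 + r, PySem.Dict.insert c' n (1 + r))

-- the generator inside max(...): collect cycle_length(n) for n in range(lo, hi+1), threading the cache
def pvGo (ns : List Int) (c : PySem.Dict Int Int) : Option (List Int × PySem.Dict Int Int) :=
  match ns with
  | [] => some ([], c)
  | n :: rest =>
    match cycleA pvFuel c n with
    | none => none
    | some (L, c') =>
      match pvGo rest c' with
      | none => none
      | some (ls, c'') => some (L :: ls, c'')

def mcrA (c : PySem.Dict Int Int) (i j : Int) : Option (Int × PySem.Dict Int Int) :=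
  match pvGo (PySem.List.pyRange (min i j) (max i j + 1) 1) c with
  | none => none
  | some (ls, c') =>
    match PySem.List.max? ls (fun y => y) with
    | none => none
    | some m => some (m, c')

def pvLineA (st : List String × PySem.Dict Int Int) (raw : String) :
    List String × PySem.Dict Int Int :=
  let line := PySem.Str.strip raw
  if line = "" then st
  else
    match PySem.Str.split₀ line with
    | [a, b] =>
      match PySem.Int.ofStr? a, PySem.Int.ofStr? b with
      | some i, some j =>
        match mcrA st.2 i j with
        | none => st          -- nontermination of the Python (fuel exhausted)
        | some (m, c') =>
          (st.1 ++ [PySem.Int.toStr i ++ " " ++ PySem.Int.toStr j ++ " " ++ PySem.Int.toStr m], c')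
      | _, _ => st            -- ValueError: excluded by Pre_solve
    | _ => st                 -- wrong token count: excluded by Pre_solve

def solve (input_text : String) : String :=
  PySem.Str.join "\n"
    ((PySem.Str.splitlines (PySem.Str.strip input_text)).foldl pvLineA ([], pvInitCache)).1

-- ===== PORT B =====
-- descend: push unseen chain values until a cached one is hit (stack grows at the head)
def pvDescend (fuel : Nat) (c : PySem.Dict Int Int) (m : Int) (stack : List Int) :
    Option (List Int × Int) :=
  match PySem.Dict.get? c m with
  | some v => some (stack, v)
  | none =>
    match fuel with
    | 0 => none
    | f + 1 =>
      pvDescend f c (if PySem.Int.mod m 2 = 1 then 3 * m + 1 else PySem.Int.floordiv m 2)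
        (m :: stack)

-- backfill: pop the stack, giving each value a cache entry one greater than its successor's
def pvBackfill (stack : List Int) (length : Int) (c : PySem.Dict Int Int) :
    Int × PySem.Dict Int Int :=
  match stack with
  | [] => (length, c)
  | v :: rest => pvBackfill rest (length + 1) (PySem.Dict.insert c v (length + 1))

def cycleB (fuel : Nat) (c : PySem.Dict Int Int) (n : Int) : Option (Int × PySem.Dict Int Int) :=
  match pvDescend fuel c n [] with
  | none => none
  | some (stack, v) => some (pvBackfill stack v c)

def pvStepB (st : Option (Int × PySem.Dict Int Int)) (n : Int) :
    Option (Int × PySem.Dict Int Int) :=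
  match st with
  | none => none
  | some (best, c) =>
    match cycleB pvFuel c n with
    | none => none
    | some (L, c') => some (if best < L then L else best, c')

def mcrB (c : PySem.Dict Int Int) (i j : Int) : Option (Int × PySem.Dict Int Int) :=
  let p := if i ≤ j then (i, j) else (j, i)
  match cycleB pvFuel c p.1 with
  | none => none
  | some (b0, c0) => (PySem.List.pyRange (p.1 + 1) (p.2 + 1) 1).foldl pvStepB (some (b0, c0))

def pvLineB (st : List String × PySem.Dict Int Int) (raw : String) :
    List String × PySem.Dict Int Int :=
  let parts := PySem.Str.split₀ (PySem.Str.strip raw)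
  match parts with
  | [] => st
  | _ :: _ =>
    match PySem.List.pyGet? parts 0, PySem.List.pyGet? parts 1 with
    | some a, some b =>
      match PySem.Int.ofStr? a, PySem.Int.ofStr? b with
      | some i, some j =>
        match mcrB st.2 i j with
        | none => st
        | some (m, c') =>
          (st.1 ++ [PySem.Int.toStr i ++ " " ++ PySem.Int.toStr j ++ " " ++ PySem.Int.toStr m], c')
      | _, _ => st
    | _, _ => st

def solve_alt (input_text : String) : String :=
  PySem.Str.join "\n"
    ((PySem.Str.splitlines (PySem.Str.strip input_text)).foldl pvLineB ([], pvInitCache)).1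

-- ===== PRECONDITION & SPEC =====
def pvTokOK (t : String) : Bool :=
  match PySem.Int.ofStr? t with
  | some v => decide (1 ≤ v)
  | none => false

-- Pre_ excludes inputs on which Python A raises: lines whose token count is not 2 or whose
-- tokens are not int()-parsable (ValueError), and non-positive integers, on which the Collatz
-- recursion never reaches 1 (RecursionError).
def Pre_solve (input_text : String) : Prop :=
  ∀ raw ∈ PySem.Str.splitlines (PySem.Str.strip input_text),
    PySem.Str.strip raw = "" ∨
      ((PySem.Str.split₀ (PySem.Str.strip raw)).length = 2 ∧
       ∀ t ∈ PySem.Str.split₀ (PySem.Str.strip raw), pvTokOK t = true)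
instance (input_text : String) : Decidable (Pre_solve input_text) := by
  unfold Pre_solve; infer_instance

def pvWitness_solve : String := "1 10\n 900 1000 "

def Spec_solve (input_text : String) (out : String) : Prop := out = solve_alt input_text
instance (input_text : String) (out : String) : Decidable (Spec_solve input_text out) := by
  unfold Spec_solve; infer_instance

-- ===== CLAIM (what is proved, stated in full; the proofs are below) =====
def Claim_equal_solve : Prop :=
  ∀ (input_text : String), Dom_solve input_text → Pre_solve input_text →
    Spec_solve input_text (solve input_text)

-- ===== LEMMAS AND PROOFS =====

-- descending with an initial stack appends that stack to the descent's own path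
theorem pvDescend_stack (fuel : Nat) (c : PySem.Dict Int Int) :
    ∀ (n : Int) (st : List Int),
      pvDescend fuel c n st = (pvDescend fuel c n []).map (fun p => (p.1 ++ st, p.2)) := by
  induction fuel with
  | zero =>
    intro n st
    rcases h : PySem.Dict.get? c n with _ | v <;> simp [pvDescend, h]
  | succ f ih =>
    intro n st
    rcases h : PySem.Dict.get? c n with _ | v
    · simp only [pvDescend, h]
      rw [ih _ (n :: st), ih _ [n]]
      rcases pvDescend f c (if PySem.Int.mod n 2 = 1 then 3 * n + 1
        else PySem.Int.floordiv n 2) [] with _ | p <;> simp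
    · simp [pvDescend, h]

theorem pvBackfill_append :
    ∀ (st : List Int) (L : Int) (c : PySem.Dict Int Int) (n : Int),
      pvBackfill (st ++ [n]) L c =
        ((pvBackfill st L c).1 + 1,
          PySem.Dict.insert (pvBackfill st L c).2 n ((pvBackfill st L c).1 + 1)) := by
  intro st
  induction st with
  | nil => intro L c n; simp [pvBackfill]
  | cons v rest ih => intro L c n; simp [pvBackfill, ih]

-- the memoized recursion and the stack-walk compute the same value and the same cache
theorem cycleA_eq_cycleB (fuel : Nat) :
    ∀ (c : PySem.Dict Int Int) (n : Int), cycleA fuel c n = cycleB fuel c n := by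
  induction fuel with
  | zero =>
    intro c n
    rcases h : PySem.Dict.get? c n with _ | v <;>
      simp [cycleA, cycleB, pvDescend, pvBackfill, h]
  | succ f ih =>
    intro c n
    rcases h : PySem.Dict.get? c n with _ | v
    · simp only [cycleA, cycleB, pvDescend, h]
      rw [show (if PySem.Int.mod n 2 = 1 then cycleA f c (3 * n + 1)
            else cycleA f c (PySem.Int.floordiv n 2))
          = cycleB f c (if PySem.Int.mod n 2 = 1 then 3 * n + 1
            else PySem.Int.floordiv n 2) by
        rw [← apply_ite (cycleA f c), ih]]
      simp only [cycleB]
      rw [pvDescend_stack f c _ [n]]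
      rcases hd : pvDescend f c (if PySem.Int.mod n 2 = 1 then 3 * n + 1
        else PySem.Int.floordiv n 2) [] with _ | p
      · simp
      · simp only [Option.map_some]
        rw [pvBackfill_append]
        simp [Int.add_comm]
    · simp [cycleA, cycleB, pvDescend, pvBackfill, h]

theorem foldl_pvStepB_none : ∀ ns : List Int, ns.foldl pvStepB none = none := by
  intro ns; induction ns with
  | nil => rfl
  | cons n rest ih => simpa [pvStepB] using ih

-- the collected list's running max equals B's max-accumulating fold
theorem pvGo_fold :
    ∀ (ns : List Int) (c : PySem.Dict Int Int) (b : Int),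
      (match pvGo ns c with
       | none => none
       | some (ls, c') => some (ls.foldl (fun acc L => if acc < L then L else acc) b, c'))
      = ns.foldl pvStepB (some (b, c)) := by
  intro ns
  induction ns with
  | nil => intro c b; simp [pvGo]
  | cons n rest ih =>
    intro c b
    simp only [pvGo, List.foldl_cons]
    rcases h : cycleA pvFuel c n with _ | p
    · rw [show pvStepB (some (b, c)) n = none by
        simp [pvStepB, ← cycleA_eq_cycleB, h]]
      simp [foldl_pvStepB_none]
    · obtain ⟨L, c1⟩ := p
      rw [show pvStepB (some (b, c)) n = some (if b < L then L else b, c1) by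
        simp [pvStepB, ← cycleA_eq_cycleB, h]]
      rw [← ih c1 (if b < L then L else b)]
      rcases hg : pvGo rest c1 with _ | q
      · simp [hg]
      · obtain ⟨ls, c2⟩ := q
        simp [hg, List.foldl_cons]

theorem foldl_if_max_eq :
    ∀ (ls : List Int) (b : Int),
      ls.foldl (fun acc L => if acc < L then L else acc) b = ls.foldl max b := by
  intro ls
  induction ls with
  | nil => intro b; rfl
  | cons x rest ih =>
    intro b
    simp only [List.foldl_cons, ih]
    congr 1
    by_cases h : b < x <;> simp [max_def] <;> omega

theorem mcrA_eq_mcrB :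
    ∀ (c : PySem.Dict Int Int) (i j : Int), mcrA c i j = mcrB c i j := by
  intro c i j
  have hkey : ∀ (lo hi : Int), lo ≤ hi →
      (match pvGo (PySem.List.pyRange lo (hi + 1) 1) c with
       | none => none
       | some (ls, c') =>
         match PySem.List.max? ls (fun y => y) with
         | none => none
         | some m => some (m, c'))
      = (match cycleB pvFuel c lo with
         | none => none
         | some (b0, c0) =>
           (PySem.List.pyRange (lo + 1) (hi + 1) 1).foldl pvStepB (some (b0, c0))) := by
    intro lo hi hle
    rw [PySem.List.pyRange_one_cons (by omega : lo < hi + 1)]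
    simp only [pvGo]
    rw [← cycleA_eq_cycleB]
    rcases h : cycleA pvFuel c lo with _ | p
    · simp
    · obtain ⟨L0, c0⟩ := p
      dsimp only
      rw [← pvGo_fold (PySem.List.pyRange (lo + 1) (hi + 1) 1) c0 L0]
      rcases hg : pvGo (PySem.List.pyRange (lo + 1) (hi + 1) 1) c0 with _ | q
      · simp
      · obtain ⟨ls, c2⟩ := q
        simp only [PySem.List.max?_id_cons]
        rw [foldl_if_max_eq]
  rcases le_total i j with h | h
  · have := hkey i j h
    simp only [mcrA, mcrB, min_eq_left h, max_eq_right h, if_pos h]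
    exact this
  · have := hkey j i h
    simp only [mcrA, mcrB, min_eq_right h, max_eq_left h]
    by_cases hij : i ≤ j
    · have hji : i = j := le_antisymm hij h
      subst hji
      simpa using hkey i i le_rfl
    · simp only [if_neg hij]
      exact this

-- one input line is handled identically when it satisfies the per-line precondition
theorem pvLine_eq (raw : String)
    (h : PySem.Str.strip raw = "" ∨
      ((PySem.Str.split₀ (PySem.Str.strip raw)).length = 2 ∧
       ∀ t ∈ PySem.Str.split₀ (PySem.Str.strip raw), pvTokOK t = true)) :
    ∀ st, pvLineA st raw = pvLineB st raw := by
  intro st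
  by_cases he : PySem.Str.strip raw = ""
  · rw [show pvLineA st raw = st by simp [pvLineA, he]]
    rw [show pvLineB st raw = st by
      simp only [pvLineB, he]
      rfl]
  · rcases h with h | ⟨hl, htok⟩
    · exact absurd h he
    · obtain ⟨a, b, hab⟩ := List.length_eq_two.mp hl
      have hga : pvTokOK a = true := htok a (by simp [hab])
      have hgb : pvTokOK b = true := htok b (by simp [hab])
      rcases hia : PySem.Int.ofStr? a with _ | i
      · simp [pvTokOK, hia] at hga
      rcases hib : PySem.Int.ofStr? b with _ | j
      · simp [pvTokOK, hib] at hgb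
      simp only [pvLineA, pvLineB, he, hab]
      simp only [PySem.List.pyGet?, PySem.List.pyIdx?]
      norm_num
      simp only [hia, hib, mcrA_eq_mcrB]

theorem foldl_lines_eq :
    ∀ (lines : List String),
      (∀ raw ∈ lines,
        PySem.Str.strip raw = "" ∨
          ((PySem.Str.split₀ (PySem.Str.strip raw)).length = 2 ∧
           ∀ t ∈ PySem.Str.split₀ (PySem.Str.strip raw), pvTokOK t = true)) →
      ∀ st, lines.foldl pvLineA st = lines.foldl pvLineB st := by
  intro lines
  induction lines with
  | nil => intro _ st; rfl
  | cons raw rest ih =>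
    intro h st
    simp only [List.foldl_cons]
    rw [pvLine_eq raw (h raw (by simp))]
    exact ih (fun r hr => h r (by simp [hr])) _

-- ===== VERDICT (by name: the statement is the Claim_ definition above) =====
theorem solve_spec : Claim_equal_solve := by
  intro input_text _hdom hpre
  unfold Spec_solve solve solve_alt
  rw [foldl_lines_eq _ hpre]
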